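-- pv_equiv track=rewrite | github.com/jessad3915/offercatcher | scripts/recruiting_sync.py | choose_primary_link
-- ===== SOURCE A (Python) =====
-- def choose_primary_link(event_type: str, urls: list[str]) -> str:
--     if not urls:
--         return ""
--
--     priority_rules = {
--         "interview": ("meeting.tencent.com", "teams", "zoom", "feishu"),
--         "ai_interview": ("nowcoder.com/ai-interview", "exam.nowcoder.com", "meeting.tencent.com"),
--         "written_exam": ("nowcoder.com", "mokahr.com", "assessment", "exam"),
--         "assessment": ("assessment", "nowcoder.com", "mokahr.com"),
--         "authorization": ("mokahr.com", "join.qq.com", "nowcoder.com"),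
--     }
--     priorities = priority_rules.get(event_type, ())
--     for needle in priorities:
--         for url in urls:
--             if needle in url:
--                 return url
--     return urls[0]
-- ===== SOURCE B (Python) =====
-- def choose_primary_link(event_type: str, urls: list[str]) -> str:
--     if not urls:
--         return ""
--
--     # same priority table as the original (shared data, not shared logic)
--     priority_rules = {
--         "interview": ("meeting.tencent.com", "teams", "zoom", "feishu"),
--         "ai_interview": ("nowcoder.com/ai-interview", "exam.nowcoder.com", "meeting.tencent.com"),
--         "written_exam": ("nowcoder.com", "mokahr.com", "assessment", "exam"),
--         "assessment": ("assessment", "nowcoder.com", "mokahr.com"),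
--         "authorization": ("mokahr.com", "join.qq.com", "nowcoder.com"),
--     }
--     priorities = priority_rules.get(event_type, ())
--     sentinel = len(priorities)
--
--     def rank(url: str) -> int:
--         return next((i for i, needle in enumerate(priorities) if needle in url), sentinel)
--
--     best, best_rank = urls[0], rank(urls[0])
--     for url in urls[1:]:
--         r = rank(url)
--         if r < best_rank:
--             best, best_rank = url, r
--     return best
-- ===== Notes on version B (the rewrite author's own statement) =====
-- stated objective: alternative
-- what changed: Replaces A's needle-major nested loops (restarting a scan over all urls for each needle) by a single pass over the urls that assigns each url the rank of its first matching needle and keeps the earliest url of minimal rank.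
import Mathlib
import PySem

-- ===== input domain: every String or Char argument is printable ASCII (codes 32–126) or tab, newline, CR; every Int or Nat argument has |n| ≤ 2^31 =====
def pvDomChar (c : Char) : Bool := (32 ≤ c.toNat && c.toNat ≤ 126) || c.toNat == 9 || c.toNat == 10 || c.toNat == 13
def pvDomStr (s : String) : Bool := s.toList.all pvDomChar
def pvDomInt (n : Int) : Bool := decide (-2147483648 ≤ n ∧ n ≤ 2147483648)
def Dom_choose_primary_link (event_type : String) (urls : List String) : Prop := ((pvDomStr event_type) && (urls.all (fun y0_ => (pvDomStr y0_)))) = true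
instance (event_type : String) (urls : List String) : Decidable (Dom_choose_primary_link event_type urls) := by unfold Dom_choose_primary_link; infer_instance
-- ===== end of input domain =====

-- B replaces A's needle-major nested loops by a single pass over the urls that keeps the
-- earliest url of minimal priority rank (objective: alternative decomposition, same cost).

-- the priority_rules dict literal (shared data table of both Pythons)
def pvPriorityRules : PySem.Dict String (List String) := PySem.Dict.ofList
  [ ("interview", ["meeting.tencent.com", "teams", "zoom", "feishu"]),
    ("ai_interview", ["nowcoder.com/ai-interview", "exam.nowcoder.com", "meeting.tencent.com"]),
    ("written_exam", ["nowcoder.com", "mokahr.com", "assessment", "exam"]),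
    ("assessment", ["assessment", "nowcoder.com", "mokahr.com"]),
    ("authorization", ["mokahr.com", "join.qq.com", "nowcoder.com"]) ]

-- ===== PORT A =====
-- 'for needle in priorities: for url in urls: if needle in url: return url'
def pvFindByNeedles : List String → List String → Option String
  | [], _ => none
  | n :: ns, urls =>
    match urls.find? (fun u => PySem.Str.isIn n u) with
    | some u => some u
    | none => pvFindByNeedles ns urls

def choose_primary_link (event_type : String) (urls : List String) : String :=
  match urls with
  | [] => ""
  | u0 :: _ =>
    let priorities := pvPriorityRules.getD event_type []
    match pvFindByNeedles priorities urls with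
    | some u => u
    | none => u0

-- ===== PORT B =====
-- rank(url) = index of the first needle contained in url, else len(priorities)
def pvRank : List String → String → Nat
  | [], _ => 0
  | n :: ns, url => if PySem.Str.isIn n url then 0 else 1 + pvRank ns url

-- 'for url in urls[1:]: r = rank(url); if r < best_rank: best, best_rank = url, r'
def pvBestFold (pris : List String) : List String → String → Nat → String
  | [], best, _ => best
  | u :: us, best, br =>
    let r := pvRank pris u
    if r < br then pvBestFold pris us u r else pvBestFold pris us best br

def choose_primary_link_alt (event_type : String) (urls : List String) : String :=
  match urls with
  | [] => ""
  | u0 :: rest =>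
    let priorities := pvPriorityRules.getD event_type []
    pvBestFold priorities rest u0 (pvRank priorities u0)

-- ===== PRECONDITION & SPEC =====
def Spec_choose_primary_link (event_type : String) (urls : List String) (out : String) : Prop := out = choose_primary_link_alt event_type urls
instance (event_type : String) (urls : List String) (out : String) : Decidable (Spec_choose_primary_link event_type urls out) := by unfold Spec_choose_primary_link; infer_instance

-- ===== CLAIM (what is proved, stated in full; the proofs are below) =====
def Claim_equal_choose_primary_link : Prop := ∀ (event_type : String) (urls : List String), Dom_choose_primary_link event_type urls → Spec_choose_primary_link event_type urls (choose_primary_link event_type urls)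

-- ===== LEMMAS AND PROOFS =====

-- with best_rank = 0 the strict update never fires
theorem pvBestFold_zero (pris : List String) (us : List String) (best : String) :
    pvBestFold pris us best 0 = best := by
  induction us with
  | nil => rfl
  | cons u us ih => simp [pvBestFold, ih]

-- if some url in the tail has rank 0 and best_rank > 0, the fold returns the first such url
theorem pvBestFold_firstZero (pris : List String) (us : List String) (u' : String)
    (h : us.find? (fun u => pvRank pris u == 0) = some u') :
    ∀ best br, 0 < br → pvBestFold pris us best br = u' := by
  induction us with
  | nil => simp at h
  | cons u us ih =>
    intro best br hbr
    by_cases h0 : pvRank pris u = 0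
    · rw [List.find?_cons_of_pos (by simp [h0])] at h
      injection h with h
      subst h
      simp only [pvBestFold]
      rw [h0, if_pos hbr, pvBestFold_zero]
    · rw [List.find?_cons_of_neg (by simp [h0])] at h
      simp only [pvBestFold]
      split
      · exact ih h u (pvRank pris u) (Nat.pos_of_ne_zero h0)
      · exact ih h best br hbr

-- rank under a needle no url matches: the head needle contributes 1 to every rank
theorem pvRank_cons_neg (n : String) (ns : List String) (u : String)
    (hu : PySem.Str.isIn n u = false) : pvRank (n :: ns) u = 1 + pvRank ns u := by
  have h' : PySem.Chars.isIn n.toList u.toList = false := by simpa using hu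
  simp [pvRank, h']

theorem pvRank_cons_pos (n : String) (ns : List String) (u : String)
    (hu : PySem.Str.isIn n u = true) : pvRank (n :: ns) u = 0 := by
  have h' : PySem.Chars.isIn n.toList u.toList = true := by simpa using hu
  simp [pvRank, h']

-- when no url in the tail contains the head needle, that needle shifts every rank by one
theorem pvBestFold_shift (n : String) (ns : List String) (us : List String)
    (h : ∀ u ∈ us, PySem.Str.isIn n u = false) :
    ∀ best br, pvBestFold (n :: ns) us best (1 + br) = pvBestFold ns us best br := by
  induction us with
  | nil => intro best br; rfl
  | cons u us ih =>
    intro best br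
    have hu : PySem.Str.isIn n u = false := h u (by simp)
    have hrest : ∀ v ∈ us, PySem.Str.isIn n v = false := fun v hv => h v (by simp [hv])
    simp only [pvBestFold, pvRank_cons_neg n ns u hu]
    by_cases hlt : pvRank ns u < br
    · rw [if_pos (show 1 + pvRank ns u < 1 + br by omega), if_pos hlt]
      exact ih hrest u (pvRank ns u)
    · rw [if_neg (show ¬ 1 + pvRank ns u < 1 + br by omega), if_neg hlt]
      exact ih hrest best br

-- rank = 0 exactly for urls containing the head needle
theorem pvRank_zero_pred (n : String) (ns : List String) :
    (fun u => pvRank (n :: ns) u == 0) = (fun u => PySem.Str.isIn n u) := by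
  funext u
  cases hb : PySem.Str.isIn n u
  · rw [pvRank_cons_neg n ns u hb]; simp
  · rw [pvRank_cons_pos n ns u hb]; simp

-- core: B's min-rank fold computes A's needle-major search (with urls[0] fallback)
theorem pvBestFold_eq_find (pris : List String) (u0 : String) (us : List String) :
    pvBestFold pris us u0 (pvRank pris u0) =
      (match pvFindByNeedles pris (u0 :: us) with | some u => u | none => u0) := by
  induction pris with
  | nil => simp [pvFindByNeedles, pvRank, pvBestFold_zero]
  | cons n ns ih =>
    simp only [pvFindByNeedles]
    cases hfind : (u0 :: us).find? (fun u => PySem.Str.isIn n u) with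
    | none =>
      -- no url contains n
      have hall := List.find?_eq_none.mp hfind
      have hu0 : PySem.Str.isIn n u0 = false := by simpa using hall u0 (by simp)
      have hus : ∀ v ∈ us, PySem.Str.isIn n v = false := fun v hv => by
        simpa using hall v (by simp [hv])
      rw [pvRank_cons_neg n ns u0 hu0, pvBestFold_shift n ns us hus]
      exact ih
    | some u' =>
      -- u' is the first url containing n
      cases hb : PySem.Str.isIn n u0 with
      | true =>
        rw [List.find?_cons_of_pos (by simpa using hb)] at hfind
        injection hfind with hfind
        subst hfind
        rw [pvRank_cons_pos n ns u0 hb, pvBestFold_zero]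
      | false =>
        rw [List.find?_cons_of_neg (by simpa using hb)] at hfind
        have hfind' : us.find? (fun u => pvRank (n :: ns) u == 0) = some u' := by
          rw [pvRank_zero_pred]; exact hfind
        rw [pvRank_cons_neg n ns u0 hb]
        exact pvBestFold_firstZero (n :: ns) us u' hfind' u0 (1 + pvRank ns u0) (by omega)

-- ===== VERDICT (by name: the statement is the Claim_ definition above) =====
theorem choose_primary_link_spec : Claim_equal_choose_primary_link := by
  intro event_type urls _
  unfold Spec_choose_primary_link choose_primary_link choose_primary_link_alt
  cases urls with
  | nil => rfl
  | cons u0 us => simpa using (pvBestFold_eq_find (pvPriorityRules.getD event_type []) u0 us).symm
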